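-- pv_equiv track=rewrite | github.com/o-manoli/BLogic | BLogic/QMC.py | traverse_loops
-- ===== SOURCE A (Python) =====
-- def traverse_loops(loops:list[list[str]]) -> list[str]:
--
-- 	if not len(loops[0]):
-- 		return list()
--
-- 	return \
-- 	loops[0] \
-- 	+ traverse_loops(
-- 	[
-- 		list(
-- 			term
-- 			for terms in loops[1:]
-- 			for term in terms
-- 			if not any(not all(x in term for x in X) for X in loops[0])
-- 		)
-- 	]
-- 	)
-- ===== SOURCE B (Python) =====
-- def traverse_loops(loops: list[list[str]]) -> list[str]:
--     if not loops[0]: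
--         return []
--     required = set().union(*(set(X) for X in loops[0]))
--     out = list(loops[0])
--     for terms in loops[1:]:
--         for term in terms:
--             if required <= set(term):
--                 out.append(term)
--     return out
-- ===== Notes on version B (the rewrite author's own statement) =====
-- stated objective: simpler
-- what changed: Replaced A's self-recursion (which rebuilds a singleton nested list and recurses, performing only one real filtering level) by a non-recursive pass: compute the required character set from loops[0] once, then append each term of the flattened loops[1:] whose character set contains it.
import Mathlib
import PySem

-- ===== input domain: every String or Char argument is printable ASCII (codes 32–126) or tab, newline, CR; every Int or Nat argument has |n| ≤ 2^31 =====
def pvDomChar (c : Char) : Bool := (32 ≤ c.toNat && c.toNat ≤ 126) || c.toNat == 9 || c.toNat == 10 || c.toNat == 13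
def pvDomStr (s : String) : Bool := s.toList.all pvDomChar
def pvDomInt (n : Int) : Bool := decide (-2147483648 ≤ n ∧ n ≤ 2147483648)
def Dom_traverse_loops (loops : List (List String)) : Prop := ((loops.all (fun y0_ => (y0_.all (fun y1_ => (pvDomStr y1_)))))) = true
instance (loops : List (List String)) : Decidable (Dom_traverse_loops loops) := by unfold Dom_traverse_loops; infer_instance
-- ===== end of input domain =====

-- B replaces A's self-recursion (which only ever performs one real filtering level) by a single
-- required-character set computed from loops[0] plus one filtering pass over the flattened tail (objective: simpler).

-- lemma used by the port's termination proof
theorem pv_flatlen_le (tail : List (List String)) :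
    (tail.flatMap id).length ≤ (tail.map (fun l => l.length + 1)).sum := by
  induction tail with
  | nil => simp
  | cons a t ih =>
      simp only [List.flatMap_cons, List.length_append, List.map_cons, List.sum_cons, id_eq]
      omega

-- ===== PORT A =====
-- the filter of A's generator expression: not any(not all(x in term for x in X) for X in loops[0])
def pvKeepA (head : List String) (term : String) : Bool :=
  ! head.any (fun X => ! X.toList.all (fun x => term.toList.contains x))

-- literal transliteration of A: recursive, rebuilding [filtered] and recursing on it.
-- (loops = [] is Python's IndexError, excluded by Pre_; the [] branch value is irrelevant there.)
def traverse_loops (loops : List (List String)) : List String :=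
  match loops with
  | [] => []
  | head :: tail =>
    if head.isEmpty then []
    else
      head ++ traverse_loops
        [ (tail.flatMap id).filter (fun term => pvKeepA head term) ]
termination_by (loops.map (fun l => l.length + 1)).sum
decreasing_by
  have hrw : tail.attach.flatMap (fun x => id x.1) = tail.flatMap id := by simp
  simp only [hrw, List.map_cons, List.map_nil, List.sum_cons, List.sum_nil]
  have h1 : (((tail.flatMap id).filter (fun term => pvKeepA head term)).length)
      ≤ (tail.flatMap id).length := List.length_filter_le _ _
  have h2 := pv_flatlen_le tail
  have h3 : 1 ≤ head.length := by
    cases head with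
    | nil => simp at *
    | cons _ _ => simp
  omega

-- ===== PORT B =====
-- required = set().union(*(set(X) for X in loops[0]))
def pvRequired (head : List String) : PySem.Set Char :=
  head.foldl (fun s X => PySem.Set.union s (PySem.Set.ofList X.toList)) PySem.Set.empty

-- literal transliteration of B: one required set, then one filtering pass over the tail.
def traverse_loops_alt (loops : List (List String)) : List String :=
  match loops with
  | [] => []
  | head :: tail =>
    if head.isEmpty then []
    else
      let required := pvRequired head
      head ++ (tail.flatMap id).filter
        (fun term => PySem.Set.issubset required (PySem.Set.ofList term.toList))

-- ===== PRECONDITION & SPEC =====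
-- Pre_ excludes only loops = [], on which the Python A raises IndexError (loops[0]).
def Pre_traverse_loops (loops : List (List String)) : Prop := loops ≠ []
instance (loops : List (List String)) : Decidable (Pre_traverse_loops loops) := by
  unfold Pre_traverse_loops; infer_instance

def pvWitness_traverse_loops : List (List String) := [["ab"], ["abc", "b"]]

def Spec_traverse_loops (loops : List (List String)) (out : List String) : Prop := out = traverse_loops_alt loops
instance (loops : List (List String)) (out : List String) : Decidable (Spec_traverse_loops loops out) := by unfold Spec_traverse_loops; infer_instance

-- ===== CLAIM (what is proved, stated in full; the proofs are below) =====
def Claim_equal_traverse_loops : Prop := ∀ (loops : List (List String)), Dom_traverse_loops loops → Pre_traverse_loops loops → Spec_traverse_loops loops (traverse_loops loops)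

-- ===== LEMMAS AND PROOFS =====

-- membership in the folded union of character sets
theorem mem_foldl_union (head : List String) (s : PySem.Set Char) (c : Char) :
    c ∈ head.foldl (fun s X => PySem.Set.union s (PySem.Set.ofList X.toList)) s ↔
      c ∈ s ∨ ∃ X ∈ head, c ∈ X.toList := by
  induction head generalizing s with
  | nil => simp
  | cons a t ih =>
      simp [ih, PySem.Set.mem_union, PySem.Set.mem_ofList, or_assoc]

theorem mem_pvRequired (head : List String) (c : Char) :
    c ∈ pvRequired head ↔ ∃ X ∈ head, c ∈ X.toList := by
  unfold pvRequired
  rw [mem_foldl_union]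
  simp [PySem.Set.empty]

-- the two per-term filters agree
theorem keep_eq (head : List String) (term : String) :
    pvKeepA head term
      = PySem.Set.issubset (pvRequired head) (PySem.Set.ofList term.toList) := by
  rw [Bool.eq_iff_iff, PySem.Set.issubset_iff]
  unfold pvKeepA
  simp only [Bool.not_eq_true', List.any_eq_false, Bool.not_eq_false, List.all_eq_true,
    PySem.Set.mem_ofList, mem_pvRequired, List.contains_iff_mem]
  constructor
  · rintro h c ⟨X, hX, hc⟩
    exact h X hX c hc
  · intro h X hX x hx
    exact h x ⟨X, hX, hx⟩

-- A's recursion on a singleton list returns that list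
theorem traverse_singleton (l : List String) : traverse_loops [l] = l := by
  by_cases h : l.isEmpty
  · rw [List.isEmpty_iff] at h
    subst h
    simp [traverse_loops]
  · rw [traverse_loops.eq_def]
    simp [h, traverse_loops]

-- ===== VERDICT (by name: the statement is the Claim_ definition above) =====
theorem traverse_loops_spec : Claim_equal_traverse_loops := by
  intro loops _ hpre
  unfold Spec_traverse_loops
  match loops with
  | [] => exact absurd rfl hpre
  | head :: tail =>
    rw [traverse_loops.eq_def, traverse_loops_alt]
    by_cases h : head.isEmpty
    · simp [h]
    · simp only [h]
      rw [traverse_singleton]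
      exact congrArg (head ++ ·) (List.filter_congr (fun term _ => keep_eq head term))
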